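-- pv_equiv track=rewrite | github.com/bmcd/crypto | mt.py | reverse_right
-- ===== SOURCE A (Python) =====
-- def _int32(x):
--     # Get the 32 least significant bits.
--     return int(0xFFFFFFFF & x)
--
-- def reverse_right(value, shift):
--     # we have the left shift bits already
--     known = shift
--     # if shift is less than 16, we need to run this multiple times
--     while(known < 32):
--         # intermediate is the input shifted by the bits
--         intermediate = value >> shift
--         # shift off already known bits on the left
--         intermediate = _int32(intermediate << known) >> known
--         # shift off unknown bits on the right past the known shifted
--         if(32 > known + shift):
--             unknown = 32 - (known + shift)
--             intermediate = intermediate >> unknown << unknown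
--         value = value ^ intermediate
--         known += shift
--
--     return value
-- ===== SOURCE B (Python) =====
-- def reverse_right(value, shift):
--     # Rebuild the untempered word one bit at a time, top bit down.
--     res = 0
--     for i in range(31, -1, -1):
--         bit = (value >> i) & 1
--         if i + shift <= 31:
--             bit ^= (res >> (i + shift)) & 1
--         res |= bit << i
--     # bits above position 31 are never touched by the tempering inverse
--     return (value & ~0xFFFFFFFF) | res
-- ===== Notes on version B (the rewrite author's own statement) =====
-- stated objective: alternative
-- what changed: B reconstructs the untempered word one bit at a time from bit 31 down (result bit i = value bit i XOR result bit i+shift) and re-attaches value's bits above position 31, instead of A's loop that xors recovered shift-wide chunks into value until all 32 bits are known.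
-- outside the precondition, e.g. on reverse_right(5, 0): A does not finish within the time limit, B returns 5; on reverse_right(5, -3): A raises ValueError, B raises ValueError
import Mathlib
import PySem

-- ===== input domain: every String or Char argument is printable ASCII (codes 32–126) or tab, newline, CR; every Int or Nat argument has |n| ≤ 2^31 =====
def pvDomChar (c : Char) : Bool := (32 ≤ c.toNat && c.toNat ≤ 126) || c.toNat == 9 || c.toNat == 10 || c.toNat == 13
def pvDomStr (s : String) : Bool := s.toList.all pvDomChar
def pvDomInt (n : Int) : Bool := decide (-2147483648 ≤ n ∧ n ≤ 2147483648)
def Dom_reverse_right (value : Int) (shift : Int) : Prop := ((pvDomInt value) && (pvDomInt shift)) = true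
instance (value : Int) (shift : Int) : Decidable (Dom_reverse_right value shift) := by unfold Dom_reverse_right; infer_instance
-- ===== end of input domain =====

-- B rebuilds the untempered word one bit at a time (top bit down) instead of xoring shift-wide chunks; alternative decomposition, not faster.


-- ===== PORT A =====
def pyInt32 (x : Int) : Int := Int.land 0xFFFFFFFF x

-- the `1 ≤ shift` conjunct only makes the recursion total: in Python the loop
-- diverges (shift = 0) or `>>` raises ValueError (shift < 0) there.
def reverseLoop (value : Int) (shift : Int) (known : Int) : Int :=
  if h : known < 32 ∧ 1 ≤ shift then
    let intermediate := Int.shiftRight value shift.toNat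
    let intermediate := Int.shiftRight (pyInt32 (Int.shiftLeft intermediate known.toNat)) known.toNat
    let intermediate :=
      if 32 > known + shift then
        let unknown := (32 - (known + shift)).toNat
        Int.shiftLeft (Int.shiftRight intermediate unknown) unknown
      else intermediate
    reverseLoop (Int.xor value intermediate) shift (known + shift)
  else value
termination_by (32 - known).toNat
decreasing_by omega

def reverse_right (value : Int) (shift : Int) : Int :=
  reverseLoop value shift shift

-- ===== PORT B =====
def reverse_right_alt (value : Int) (shift : Int) : Int :=
  let res := (PySem.List.pyRange 31 (-1) (-1)).foldl (fun res i =>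
    let bit := Int.land (Int.shiftRight value i.toNat) 1
    let bit := if i + shift ≤ 31 then Int.xor bit (Int.land (Int.shiftRight res (i + shift).toNat) 1) else bit
    Int.lor res (Int.shiftLeft bit i.toNat)) 0
  -- Int.lnot is Python's ~ (no ~~~ instance on Int here)
  Int.lor (Int.land value (Int.lnot 0xFFFFFFFF)) res

-- ===== PRECONDITION & SPEC =====
-- Pre_ excludes shift ≤ 0: there A never returns (ValueError for shift < 0, infinite loop for shift = 0).
def Pre_reverse_right (value : Int) (shift : Int) : Prop := 1 ≤ shift
instance (value : Int) (shift : Int) : Decidable (Pre_reverse_right value shift) := by unfold Pre_reverse_right; infer_instance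
def pvWitness_reverse_right : Int × Int := (123456789, 7)

def Spec_reverse_right (value : Int) (shift : Int) (out : Int) : Prop := out = reverse_right_alt value shift
instance (value : Int) (shift : Int) (out : Int) : Decidable (Spec_reverse_right value shift out) := by unfold Spec_reverse_right; infer_instance

-- ===== CLAIM (what is proved, stated in full; the proofs are below) =====
def Claim_equal_reverse_right : Prop := ∀ (value : Int) (shift : Int), Dom_reverse_right value shift → Pre_reverse_right value shift → Spec_reverse_right value shift (reverse_right value shift)

-- ===== LEMMAS AND PROOFS =====

-- if-then-else 0/1 as an Int from a Bool
def b2i (b : Bool) : Int := if b then 1 else 0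

lemma nat_testBit_one (j : Nat) : Nat.testBit 1 j = decide (j = 0) := by
  cases j with
  | zero => decide
  | succ n => rw [Nat.testBit_add_one]; norm_num [Nat.zero_testBit]

lemma testBit_b2i (b : Bool) (j : Nat) : (b2i b).testBit j = (decide (j = 0) && b) := by
  cases b <;> simp [b2i, Int.testBit, nat_testBit_one, Nat.zero_testBit]

lemma int_testBit_shiftRight (x : Int) (s j : Nat) :
    (Int.shiftRight x s).testBit j = x.testBit (j + s) := by
  cases x with
  | ofNat n =>
    show (Int.ofNat (n >>> s)).testBit j = _
    simp [Int.testBit, Nat.testBit_shiftRight, Nat.add_comm]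
  | negSucc n =>
    show (Int.negSucc (n >>> s)).testBit j = _
    simp [Int.testBit, Nat.testBit_shiftRight, Nat.add_comm]

lemma nat_testBit_shiftLeft_sub_one (m s j : Nat) (hm : 1 ≤ m) :
    (m <<< s - 1).testBit j = (decide (j < s) || (m - 1).testBit (j - s)) := by
  induction s generalizing j with
  | zero => simp [Nat.shiftLeft_zero]
  | succ s ih =>
    have h2 : m <<< (s + 1) - 1 = 2 * (m <<< s - 1) + 1 := by
      have h1 : 1 ≤ m <<< s := by
        rw [Nat.shiftLeft_eq]
        exact Nat.mul_pos hm (Nat.two_pow_pos s)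
      rw [Nat.shiftLeft_succ]; omega
    rw [h2]
    cases j with
    | zero => simp [Nat.testBit_zero]
    | succ j =>
      rw [Nat.testBit_add_one]
      have h3 : (2 * (m <<< s - 1) + 1) / 2 = m <<< s - 1 := by omega
      have h4 : j + 1 - (s + 1) = j - s := by omega
      have h5 : decide (j + 1 < s + 1) = decide (j < s) := by simp
      rw [h3, ih, h4, h5]

lemma int_testBit_shiftLeft (x : Int) (s j : Nat) :
    (Int.shiftLeft x s).testBit j = (decide (s ≤ j) && x.testBit (j - s)) := by
  cases x with
  | ofNat n =>
    show (Int.ofNat (n <<< s)).testBit j = _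
    simp [Int.testBit, Nat.testBit_shiftLeft]
  | negSucc n =>
    show (Int.negSucc ((n + 1) <<< s - 1)).testBit j = _
    simp only [Int.testBit, nat_testBit_shiftLeft_sub_one (n + 1) s j (by omega)]
    simp
    by_cases h : s ≤ j <;> simp [h]

lemma int_ext_testBit {x y : Int} (h : ∀ i, x.testBit i = y.testBit i) : x = y := by
  cases x with
  | ofNat m =>
    cases y with
    | ofNat n =>
      congr 1
      exact Nat.eq_of_testBit_eq (fun i => by have := h i; simpa [Int.testBit] using this)
    | negSucc n =>
      exfalso
      have hi := h (m + n)
      have hm : m.testBit (m + n) = false :=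
        Nat.testBit_eq_false_of_lt (lt_of_lt_of_le (Nat.lt_two_pow_self) (Nat.pow_le_pow_right (by norm_num) (by omega)))
      have hn : n.testBit (m + n) = false :=
        Nat.testBit_eq_false_of_lt (lt_of_lt_of_le (Nat.lt_two_pow_self) (Nat.pow_le_pow_right (by norm_num) (by omega)))
      simp [Int.testBit, hm, hn] at hi
  | negSucc m =>
    cases y with
    | ofNat n =>
      exfalso
      have hi := h (m + n)
      have hm : m.testBit (m + n) = false :=
        Nat.testBit_eq_false_of_lt (lt_of_lt_of_le (Nat.lt_two_pow_self) (Nat.pow_le_pow_right (by norm_num) (by omega)))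
      have hn : n.testBit (m + n) = false :=
        Nat.testBit_eq_false_of_lt (lt_of_lt_of_le (Nat.lt_two_pow_self) (Nat.pow_le_pow_right (by norm_num) (by omega)))
      simp [Int.testBit, hm, hn] at hi
    | negSucc n =>
      congr 1
      exact Nat.eq_of_testBit_eq (fun i => by have := h i; simpa [Int.testBit] using this)

lemma mask_testBit (j : Nat) : (0xFFFFFFFF : Int).testBit j = decide (j < 32) := by
  have h : (0xFFFFFFFF : Int) = Int.ofNat 0xFFFFFFFF := rfl
  have h2 : (0xFFFFFFFF : Nat) = 2 ^ 32 - 1 := by norm_num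
  rw [h]
  show Nat.testBit 0xFFFFFFFF j = _
  rw [h2, Nat.testBit_two_pow_sub_one]

lemma one_testBit (j : Nat) : (1 : Int).testBit j = decide (j = 0) := by
  show (Int.ofNat 1).testBit j = _
  simp [Int.testBit, nat_testBit_one]

-- the common per-bit specification of the untempered word
def specBit (v : Int) (s : Int) (i : Nat) : Bool :=
  if h : 1 ≤ s ∧ (i : Int) + s < 32 ∧ i < 32 then
    xor (v.testBit i) (specBit v s (i + s.toNat))
  else v.testBit i
termination_by 32 - i
decreasing_by omega

lemma specBit_high (v s : Int) (i : Nat) (h : ¬((i : Int) + s < 32 ∧ i < 32)) :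
    specBit v s i = v.testBit i := by
  rw [specBit]
  have h2 : ¬(1 ≤ s ∧ (i : Int) + s < 32 ∧ i < 32) := by tauto
  simp [h2]

-- the bit profile of the intermediate value xored in by one iteration of A's loop
lemma inter_bit (v s k : Int) (hs : 1 ≤ s) (hk32 : k < 32) (hk0 : 0 ≤ k) (j : Nat) :
    (if 32 > k + s then
       Int.shiftLeft (Int.shiftRight (Int.shiftRight (pyInt32 (Int.shiftLeft (Int.shiftRight v s.toNat) k.toNat)) k.toNat) (32 - (k + s)).toNat) (32 - (k + s)).toNat
     else Int.shiftRight (pyInt32 (Int.shiftLeft (Int.shiftRight v s.toNat) k.toNat)) k.toNat).testBit j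
    = (decide ((j : Int) + k < 32 ∧ 32 ≤ (j : Int) + k + s) && v.testBit (j + s.toNat)) := by
  by_cases hb : 32 > k + s
  · rw [if_pos hb]
    set u := (32 - (k + s)).toNat with hu
    rw [int_testBit_shiftLeft]
    by_cases hju : u ≤ j
    · have hj : j - u + u = j := by omega
      rw [int_testBit_shiftRight, hj, int_testBit_shiftRight]
      simp only [pyInt32, Int.testBit_land, mask_testBit, int_testBit_shiftLeft, int_testBit_shiftRight]
      have h1 : k.toNat ≤ j + k.toNat := by omega
      have h2 : j + k.toNat - k.toNat = j := by omega
      rw [h2]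
      by_cases h3 : j + k.toNat < 32
      · have h4 : (j : Int) + k < 32 ∧ 32 ≤ (j : Int) + k + s := by omega
        simp [h1, h3, h4, hju]
      · have h4 : ¬((j : Int) + k < 32 ∧ 32 ≤ (j : Int) + k + s) := by omega
        simp [h3, h4]
    · have h4 : ¬((j : Int) + k < 32 ∧ 32 ≤ (j : Int) + k + s) := by omega
      simp [hju, h4]
  · rw [if_neg hb]
    simp only [pyInt32, Int.testBit_land, mask_testBit, int_testBit_shiftLeft, int_testBit_shiftRight]
    have h1 : k.toNat ≤ j + k.toNat := by omega
    have h2 : j + k.toNat - k.toNat = j := by omega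
    rw [h2]
    by_cases h3 : j + k.toNat < 32
    · have h4 : (j : Int) + k < 32 ∧ 32 ≤ (j : Int) + k + s := by omega
      simp [h1, h3, h4]
    · have h4 : ¬((j : Int) + k < 32 ∧ 32 ≤ (j : Int) + k + s) := by omega
      simp [h3, h4]

lemma loopA_bits (y s : Int) (hs : 1 ≤ s) :
    ∀ (k : Int) (v : Int), s ≤ k →
    (∀ j : Nat, v.testBit j = if (j : Int) + k < 32 then y.testBit j else specBit y s j) →
    ∀ j : Nat, (reverseLoop v s k).testBit j = specBit y s j := by
  suffices H : ∀ (n : Nat) (k v : Int), (32 - k).toNat ≤ n → s ≤ k →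
      (∀ j : Nat, v.testBit j = if (j : Int) + k < 32 then y.testBit j else specBit y s j) →
      ∀ j : Nat, (reverseLoop v s k).testBit j = specBit y s j by
    intro k v hk hinv j
    exact H (32 - k).toNat k v le_rfl hk hinv j
  intro n
  induction n with
  | zero =>
    intro k v hn hk hinv j
    rw [reverseLoop, dif_neg (by omega)]
    have h := hinv j
    rwa [if_neg (by omega)] at h
  | succ n ih =>
    intro k v hn hk hinv j
    by_cases hcond : k < 32
    · rw [reverseLoop, dif_pos ⟨hcond, hs⟩]
      apply ih (k + s) _ (by omega) (by omega)
      intro j'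
      rw [Int.testBit_lxor, inter_bit v s k hs hcond (by omega) j']
      by_cases c1 : (j' : Int) + k + s < 32
      · -- below the newly recovered window: untouched, still a bit of y
        rw [if_pos (by omega)]
        have h := hinv j'
        rw [if_pos (by omega)] at h
        simp [h, show ¬((j' : Int) + k < 32 ∧ 32 ≤ (j' : Int) + k + s) from by omega]
      · rw [if_neg (by omega)]
        by_cases c2 : (j' : Int) + k < 32
        · -- the newly recovered window: bit j' = y bit j' ^ spec bit (j'+s)
          have h := hinv j'
          rw [if_pos (by omega)] at h
          have h2 := hinv (j' + s.toNat)
          rw [if_neg (by omega)] at h2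
          rw [h, h2, show (decide ((j' : Int) + k < 32 ∧ 32 ≤ (j' : Int) + k + s)) = true from by simp; omega]
          have hg : 1 ≤ s ∧ (j' : Int) + s < 32 ∧ j' < 32 := by omega
          conv_rhs => rw [specBit]
          simp [hg]
        · -- already recovered earlier: the xored value has bit 0 here
          have h := hinv j'
          rw [if_neg (by omega)] at h
          simp [h, show ¬((j' : Int) + k < 32 ∧ 32 ≤ (j' : Int) + k + s) from by omega]
    · rw [reverseLoop, dif_neg (by omega)]
      have h := hinv j
      rwa [if_neg (by omega)] at h

def descList : Nat → List Int
  | 0 => []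
  | n + 1 => ((n : Nat) : Int) :: descList n

lemma pyRange_eq : PySem.List.pyRange 31 (-1) (-1) = descList 32 := by decide

lemma zero_testBit (j : Nat) : (0 : Int).testBit j = false := by
  show (Int.ofNat 0).testBit j = false
  simp [Int.testBit, Nat.zero_testBit]

lemma land_one (x : Int) : Int.land x 1 = b2i (x.testBit 0) := by
  apply int_ext_testBit
  intro i
  rw [Int.testBit_land, one_testBit, testBit_b2i]
  by_cases h : i = 0 <;> simp [h]

lemma xor_b2i (a b : Bool) : Int.xor (b2i a) (b2i b) = b2i (xor a b) := by
  cases a <;> cases b <;> decide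

lemma foldB_inv (v s : Int) (hs : 1 ≤ s) :
    ∀ (n : Nat) (res : Int), n ≤ 32 →
    (∀ j : Nat, res.testBit j = (decide (n ≤ j ∧ j < 32) && specBit v s j)) →
    ∀ j : Nat, ((descList n).foldl (fun res i =>
        let bit := Int.land (Int.shiftRight v i.toNat) 1
        let bit := if i + s ≤ 31 then Int.xor bit (Int.land (Int.shiftRight res (i + s).toNat) 1) else bit
        Int.lor res (Int.shiftLeft bit i.toNat)) res).testBit j
      = (decide (j < 32) && specBit v s j) := by
  intro n
  induction n with
  | zero =>
    intro res _ hres j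
    rw [descList, List.foldl_nil, hres]
    simp
  | succ n ih =>
    intro res hn hres j
    rw [descList, List.foldl_cons]
    apply ih _ (by omega)
    intro j'
    dsimp only
    have htn : ((n : Int)).toNat = n := by simp
    -- the bit written at position n is exactly specBit v s n
    have hbit : (if (n : Int) + s ≤ 31
          then Int.xor (Int.land (Int.shiftRight v ((n : Int)).toNat) 1) (Int.land (Int.shiftRight res ((n : Int) + s).toNat) 1)
          else Int.land (Int.shiftRight v ((n : Int)).toNat) 1) = b2i (specBit v s n) := by
      rw [htn, land_one, int_testBit_shiftRight, Nat.zero_add]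
      by_cases hc : (n : Int) + s ≤ 31
      · rw [if_pos hc, land_one, int_testBit_shiftRight, Nat.zero_add]
        have he : ((n : Int) + s).toNat = n + s.toNat := by omega
        rw [he, hres, xor_b2i]
        have hd : n ≤ n + s.toNat ∧ n + s.toNat < 32 := by omega
        have hg : 1 ≤ s ∧ (n : Int) + s < 32 ∧ n < 32 := by omega
        have h5 : (1 : Nat) ≤ s.toNat := by omega
        conv_rhs => rw [specBit]
        simp [hd, hg, h5]
      · rw [if_neg hc]
        rw [specBit_high v s n (by omega)]
    rw [hbit, Int.testBit_lor, hres, int_testBit_shiftLeft, testBit_b2i, htn]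
    by_cases hj : j' = n
    · subst hj
      have h1 : ¬(j' + 1 ≤ j' ∧ j' < 32) := by omega
      have h2 : j' < 32 := by omega
      simp [h1, h2]
    · by_cases hnj : n ≤ j'
      · have h1 : ¬(j' - n = 0) := by omega
        have h2 : (n + 1 ≤ j' ∧ j' < 32) = (n ≤ j' ∧ j' < 32) := by
          apply propext; constructor <;> (intro; omega)
        have h3 : n < j' := by omega
        simp [h1, h2, hnj, h3]
      · have h1 : ¬(n + 1 ≤ j' ∧ j' < 32) := by omega
        have h2 : ¬(n ≤ j' ∧ j' < 32) := by omega
        simp [h1, h2, hnj]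
        intro h _
        omega

lemma foldB_bits (v s : Int) (hs : 1 ≤ s) :
    ∀ j : Nat, (reverse_right_alt v s).testBit j = specBit v s j := by
  intro j
  rw [reverse_right_alt]
  dsimp only
  rw [pyRange_eq]
  rw [Int.testBit_lor, Int.testBit_land, Int.testBit_lnot, mask_testBit]
  rw [foldB_inv v s hs 32 0 le_rfl (fun j => by simp [zero_testBit]) j]
  by_cases hj : j < 32
  · simp [hj]
  · rw [specBit_high v s j (by omega)]
    simp [hj]

-- ===== VERDICT (by name: the statement is the Claim_ definition above) =====
theorem reverse_right_spec : Claim_equal_reverse_right := by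
  intro value shift _ hpre
  show reverse_right value shift = reverse_right_alt value shift
  apply int_ext_testBit
  intro j
  rw [foldB_bits value shift hpre]
  apply loopA_bits value shift hpre shift value le_rfl
  intro j
  split
  · rfl
  · rw [specBit_high]
    omega
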